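-- pv_equiv track=rewrite | github.com/hugechuanqi/Algorithms-and-Data-Structures | Interview/practice/mt_01.最长全1串.py | maxSolutionNumber
-- ===== SOURCE A (Python) =====
-- def maxSolutionNumber(n, k, num):
--     i,j =0,0
--     res = 0
--     while j<n:
--         if num[j]==1:
--             j += 1
--         elif k > 0:
--             k -= 1
--             j += 1
--         else:
--             res = max(res,j-i)
--             while i<j and num[i]==1:
--                 i += 1
--             j += 1
--             i += 1
--     res = max(res,j-i)
--     return res
-- ===== SOURCE B (Python) =====
-- def maxSolutionNumber(n, k, num):
--     prefix = num[:n] if n > 0 else []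
--     L = len(prefix)
--     k0 = k if k > 0 else 0
--     zpos = [i for i, v in enumerate(prefix) if v != 1]
--     m = len(zpos)
--     if m <= k0:
--         return L
--     P = [-1] + zpos + [L]
--     return max(P[g + k0 + 1] - P[g] - 1 for g in range(m - k0 + 1))
-- ===== Notes on version B (the rewrite author's own statement) =====
-- stated objective: alternative
-- what changed: Replaces A's two-pointer sliding window over all elements by a closed-form maximum over the zero-position list: B collects the indices of non-1 entries once, and if more than max(k,0) remain, returns the largest window bracketed by two zeros holding at most max(k,0) flipped zeros.
import Mathlib
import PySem

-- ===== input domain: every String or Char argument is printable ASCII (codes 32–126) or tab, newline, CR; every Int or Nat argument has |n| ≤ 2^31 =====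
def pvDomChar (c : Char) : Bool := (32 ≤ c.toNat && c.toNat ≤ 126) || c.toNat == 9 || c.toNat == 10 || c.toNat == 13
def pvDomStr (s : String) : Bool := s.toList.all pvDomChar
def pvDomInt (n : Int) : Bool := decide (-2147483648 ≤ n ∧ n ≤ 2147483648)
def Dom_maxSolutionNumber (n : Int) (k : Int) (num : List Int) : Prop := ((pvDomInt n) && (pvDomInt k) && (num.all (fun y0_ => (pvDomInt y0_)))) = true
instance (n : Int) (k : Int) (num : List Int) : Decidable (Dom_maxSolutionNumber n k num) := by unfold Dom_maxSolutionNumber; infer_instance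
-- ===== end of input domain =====

-- B replaces A's two-pointer sliding window by a closed-form maximum over the zero-position
-- list (each window bracketed by two zeros holding at most k flipped zeros); same O(n) cost.

-- ===== PORT A =====
-- inner 'while i<j and num[i]==1: i += 1'; fuel (j-i).toNat suffices (i increases each step)
def pySkipOnes (num : List Int) (j : Int) : Nat → Int → Int
  | 0, i => i
  | f+1, i =>
    if i < j then
      match PySem.List.pyGet? num i with
      | some v => if v = 1 then pySkipOnes num j f (i+1) else i
      | none => i      -- unreachable under Pre_ (Python would raise IndexError)
    else i

-- outer 'while j<n'; j increases by 1 each iteration, so fuel n.toNat suffices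
def pyLoopA (num : List Int) (n : Int) : Nat → Int → Int → Int → Int → Int
  | 0, i, j, _k, res => max res (j - i)     -- fuel exhausted only when j ≥ n (loop over)
  | f+1, i, j, k, res =>
    if j < n then
      match PySem.List.pyGet? num j with
      | none => 0      -- unreachable under Pre_ (Python raises IndexError when n > len(num))
      | some v =>
        if v = 1 then pyLoopA num n f i (j+1) k res
        else if k > 0 then pyLoopA num n f i (j+1) (k-1) res
        else pyLoopA num n f (pySkipOnes num j (j - i).toNat i + 1) (j+1) k (max res (j - i))
    else max res (j - i)

def maxSolutionNumber (n : Int) (k : Int) (num : List Int) : Int :=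
  pyLoopA num n n.toNat 0 0 k 0

-- ===== PORT B =====
def maxSolutionNumber_alt (n : Int) (k : Int) (num : List Int) : Int :=
  let pref : List Int := if n > 0 then PySem.List.slice num none (some n) else []
  let L : Int := (pref.length : Int)
  let k0 : Int := if k > 0 then k else 0
  let zpos : List Int :=
    (PySem.List.enumerate pref 0).filterMap (fun iv => if iv.2 ≠ 1 then some iv.1 else none)
  let m : Int := (zpos.length : Int)
  if m ≤ k0 then L
  else
    let P : List Int := -1 :: (zpos ++ [L])
    (PySem.List.max?
      ((PySem.List.pyRange 0 (m - k0 + 1) 1).map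
        (fun g => PySem.List.pyGetD P (g + k0 + 1) 0 - PySem.List.pyGetD P g 0 - 1))
      (fun x => x)).getD 0

-- ===== PRECONDITION & SPEC =====
-- A indexes num[j] for every j in [0, n), so it raises IndexError exactly when n > len(num).
def Pre_maxSolutionNumber (n : Int) (k : Int) (num : List Int) : Prop := n ≤ (num.length : Int)
instance (n : Int) (k : Int) (num : List Int) : Decidable (Pre_maxSolutionNumber n k num) := by
  unfold Pre_maxSolutionNumber; infer_instance

def pvWitness_maxSolutionNumber : Int × Int × List Int := (5, 1, [1, 0, 1, 0, 1])

def Spec_maxSolutionNumber (n : Int) (k : Int) (num : List Int) (out : Int) : Prop := out = maxSolutionNumber_alt n k num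
instance (n : Int) (k : Int) (num : List Int) (out : Int) : Decidable (Spec_maxSolutionNumber n k num out) := by unfold Spec_maxSolutionNumber; infer_instance

-- ===== CLAIM (what is proved, stated in full; the proofs are below) =====
def Claim_equal_maxSolutionNumber : Prop := ∀ (n : Int) (k : Int) (num : List Int), Dom_maxSolutionNumber n k num → Pre_maxSolutionNumber n k num → Spec_maxSolutionNumber n k num (maxSolutionNumber n k num)


-- ===== LEMMAS AND PROOFS =====

-- Nat positions of the entries ≠ 1 among the first N entries of num
def pvZN (num : List Int) (N : Nat) : List Nat :=
  (List.range N).filter (fun t => decide (num.getD t 0 ≠ 1))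

-- the bracketing list  P = [-1] ++ zero positions ++ [n]
def pvP (num : List Int) (n : Int) : List Int :=
  -1 :: ((pvZN num n.toNat).map (fun t : Nat => (t : Int)) ++ [n])

def pvTerm (num : List Int) (n : Int) (k0n : Nat) (g : Nat) : Int :=
  (pvP num n).getD (g + k0n + 1) 0 - (pvP num n).getD g 0 - 1

def pvRes (num : List Int) (n : Int) (k0n : Nat) (s : Nat) : Int :=
  (List.range s).foldl (fun a g => max a (pvTerm num n k0n g)) 0

def pvI (num : List Int) (n : Int) (k0n : Nat) (t : Nat) : Int :=
  (pvP num n).getD (t - k0n) 0 + 1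

lemma pvZN_mem (num : List Int) (N : Nat) (t : Nat) :
    t ∈ pvZN num N ↔ t < N ∧ num.getD t 0 ≠ 1 := by
  simp [pvZN, List.mem_filter, List.mem_range]

lemma pvZN_pairwise (num : List Int) (N : Nat) : (pvZN num N).Pairwise (· < ·) :=
  List.Pairwise.sublist (List.filter_sublist) (List.pairwise_lt_range)

lemma pvZN_nodup (num : List Int) (N : Nat) : (pvZN num N).Nodup :=
  (pvZN_pairwise num N).imp (fun h => Nat.ne_of_lt h)

lemma pvP_pairwise (num : List Int) (n : Int) (hn : 0 ≤ n) :
    (pvP num n).Pairwise (· < ·) := by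
  have hz : ∀ t ∈ pvZN num n.toNat, t < n.toNat := fun t ht => ((pvZN_mem _ _ _).1 ht).1
  refine List.pairwise_cons.mpr ⟨?_, ?_⟩
  · intro y hy
    rcases List.mem_append.1 hy with h | h
    · rcases List.mem_map.1 h with ⟨t, _, rfl⟩
      omega
    · simp only [List.mem_singleton] at h
      omega
  · refine List.pairwise_append.mpr ⟨?_, ?_, ?_⟩
    · exact List.pairwise_map.mpr ((pvZN_pairwise num n.toNat).imp (fun h => by exact_mod_cast h))
    · simp
    · intro a ha b hb
      rcases List.mem_map.1 ha with ⟨t, ht, rfl⟩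
      simp only [List.mem_singleton] at hb
      subst hb
      have := hz t ht
      omega

lemma pvP_length (num : List Int) (n : Int) :
    (pvP num n).length = (pvZN num n.toNat).length + 2 := by
  simp [pvP]

lemma pvP_getD_zero (num : List Int) (n : Int) : (pvP num n).getD 0 0 = -1 := rfl

lemma pvP_getD_succ (num : List Int) (n : Int) (idx : Nat)
    (h : idx < (pvZN num n.toNat).length) :
    (pvP num n).getD (idx+1) 0 = ((pvZN num n.toNat).getD idx 0 : Int) := by
  unfold pvP
  rw [List.getD_cons_succ]
  have h1 : idx < ((pvZN num n.toNat).map (fun t : Nat => (t : Int))).length := by simpa using h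
  rw [List.getD_eq_getElem _ _ (by simp; omega), List.getElem_append_left h1,
    List.getElem_map, List.getD_eq_getElem _ _ h]

lemma pvP_getD_last (num : List Int) (n : Int) :
    (pvP num n).getD ((pvZN num n.toNat).length + 1) 0 = n := by
  unfold pvP
  rw [List.getD_cons_succ]
  rw [List.getD_eq_getElem _ _ (by simp)]
  rw [List.getElem_append_right (by simp)]
  simp

lemma pvRes_succ (num : List Int) (n : Int) (k0n s : Nat) :
    pvRes num n k0n (s+1) = max (pvRes num n k0n s) (pvTerm num n k0n s) := by
  unfold pvRes
  rw [List.range_succ, List.foldl_append]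
  simp

lemma pvPlusD (l : List Int) (hp : l.Pairwise (· < ·)) :
    ∀ (d a : Nat), a + d < l.length → l.getD a 0 + (d : Int) ≤ l.getD (a + d) 0 := by
  intro d
  induction d with
  | zero => intro a h; simp
  | succ d ih =>
    intro a h
    have h1 := ih a (by omega)
    have hpg := (List.pairwise_iff_getElem.mp hp) (a+d) (a+d+1) (by omega) (by omega) (by omega)
    have e1 : l.getD (a+d) 0 = l[a+d]'(by omega) := List.getD_eq_getElem l 0 (by omega)
    have e2 : l.getD (a+(d+1)) 0 = l[a+d+1]'(by omega) := by
      have e : a + (d+1) = a+d+1 := by omega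
      rw [e]; exact List.getD_eq_getElem l 0 (by omega)
    rw [e2]
    rw [e1] at h1
    push_cast
    omega

lemma pvMono (l : List Int) (hp : l.Pairwise (· < ·)) (a b : Nat) (hab : a ≤ b)
    (hb : b < l.length) : l.getD a 0 ≤ l.getD b 0 := by
  have h := pvPlusD l hp (b - a) a (by omega)
  have e : a + (b - a) = b := by omega
  rw [e] at h
  omega

lemma pvCount_step (l : List Nat) (hnd : l.Nodup) (j : Nat) :
    l.countP (fun x => decide (x < j+1)) =
      l.countP (fun x => decide (x < j)) + (if j ∈ l then 1 else 0) := by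
  induction l with
  | nil => simp
  | cons a tl ih =>
    obtain ⟨hna, hnd2⟩ := List.nodup_cons.1 hnd
    rw [List.countP_cons, List.countP_cons, ih hnd2]
    simp only [List.mem_cons, decide_eq_true_eq]
    by_cases haj : a = j
    · subst haj
      simp [hna]
    · have hji : ¬ (j = a) := fun h => haj h.symm
      simp only [hji, false_or]
      split_ifs <;> omega

lemma pvCount_getD (l : List Nat) (hp : l.Pairwise (· < ·)) (j : Nat) (hj : j ∈ l) :
    l.countP (fun x => decide (x < j)) < l.length ∧
      l.getD (l.countP (fun x => decide (x < j))) 0 = j := by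
  induction l with
  | nil => cases hj
  | cons a tl ih =>
    obtain ⟨ha, hp2⟩ := List.pairwise_cons.1 hp
    rcases List.mem_cons.1 hj with rfl | hj2
    · have h0 : tl.countP (fun x => decide (x < j)) = 0 :=
        List.countP_eq_zero.mpr (fun x hx => by
          simp only [decide_eq_true_eq]
          have := ha x hx
          omega)
      rw [List.countP_cons, h0]
      simp
    · have haj : a < j := ha j hj2
      obtain ⟨ih1, ih2⟩ := ih hp2 hj2
      have hda : decide (a < j) = true := by simpa using haj
      rw [List.countP_cons, hda]
      simp only [if_true]
      refine ⟨by simp only [List.length_cons]; omega, ?_⟩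
      rw [List.getD_cons_succ]
      exact ih2

lemma pvSkip (num : List Int) (j : Int) :
    ∀ (f : Nat) (i b : Int), i ≤ b → b ≤ j → b - i ≤ (f : Int) →
    (∀ x : Int, i ≤ x → x < b → PySem.List.pyGet? num x = some 1) →
    (b = j ∨ (b < j ∧ ∃ v, PySem.List.pyGet? num b = some v ∧ v ≠ 1)) →
    pySkipOnes num j f i = b := by
  intro f
  induction f with
  | zero =>
    intro i b h1 h2 h3 _ _
    have : i = b := by omega
    subst this
    rfl
  | succ f ih =>
    intro i b h1 h2 h3 h4 h5
    by_cases hib : i = b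
    · subst hib
      rcases h5 with rfl | ⟨hlt, v, hv, hv1⟩
      · simp [pySkipOnes]
      · simp only [pySkipOnes]
        rw [if_pos hlt, hv]
        simp [hv1]
    · have hib2 : i < b := by omega
      have hone := h4 i le_rfl hib2
      have hij : i < j := by omega
      simp only [pySkipOnes]
      rw [if_pos hij, hone]
      simp only [reduceIte]
      exact ih (i+1) b (by omega) h2 (by omega) (fun x hx1 hx2 => h4 x (by omega) hx2) h5

lemma pvTakeGetD (num : List Int) (N t : Nat) (h : t < N) :
    (num.take N).getD t 0 = num.getD t 0 := by
  rw [List.getD_eq_getElem?_getD, List.getD_eq_getElem?_getD, List.getElem?_take_of_lt h]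

lemma pvEnumFilter (l : List Int) :
    ∀ s : Int,
      (PySem.List.enumerate l s).filterMap (fun iv => if iv.2 ≠ 1 then some iv.1 else none)
        = ((List.range l.length).filter (fun t => decide (l.getD t 0 ≠ 1))).map
            (fun t : Nat => s + (t : Int)) := by
  induction l with
  | nil => intro s; simp [PySem.List.enumerate_nil]
  | cons x xs ih =>
    intro s
    rw [PySem.List.enumerate_cons, List.length_cons, List.range_succ_eq_map, List.filter_cons]
    have htail :
        (List.filter (fun t => decide ((x::xs).getD t 0 ≠ 1)) ((List.range xs.length).map Nat.succ))
          = ((List.range xs.length).filter (fun t => decide (xs.getD t 0 ≠ 1))).map Nat.succ := by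
      rw [List.filter_map]
      congr 1
    have hmaps :
        (((List.range xs.length).filter (fun t => decide (xs.getD t 0 ≠ 1))).map Nat.succ).map
            (fun t : Nat => s + (t : Int))
          = ((List.range xs.length).filter (fun t => decide (xs.getD t 0 ≠ 1))).map
              (fun t : Nat => (s+1) + (t : Int)) := by
      rw [List.map_map]
      apply List.map_congr_left
      intro t _
      simp only [Function.comp]
      push_cast
      ring
    by_cases hx : x = 1
    · subst hx
      rw [List.filterMap_cons_none (by simp), ih (s+1)]
      rw [if_neg (by simp)]
      rw [htail, hmaps]
    · have hstep2 := List.filterMap_cons_some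
        (f := fun iv : Int × Int => if iv.2 ≠ 1 then some iv.1 else none)
        (a := ((s : Int), x)) (l := PySem.List.enumerate xs (s+1)) (b := s)
        (by simp [hx])
      rw [hstep2, ih (s+1)]
      rw [if_pos (by simp [hx])]
      rw [List.map_cons, htail, hmaps]
      simp

lemma pvMaxFold (l : List Int) (h0 : ∀ x ∈ l, 0 ≤ x) :
    (PySem.List.max? l (fun x => x)).getD 0 = l.foldl max 0 := by
  cases l with
  | nil => rfl
  | cons x t =>
    rw [PySem.List.max?_id_cons]
    simp only [Option.getD_some, List.foldl_cons]
    rw [max_eq_right (h0 x (by simp))]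

-- step lemmas reducing one iteration of the ported outer loop
lemma pyLoopA_end (num : List Int) (n : Int) (f : Nat) (i j k res : Int) (h : ¬ j < n) :
    pyLoopA num n (f+1) i j k res = max res (j - i) := by
  simp only [pyLoopA]
  rw [if_neg h]

lemma pyLoopA_one (num : List Int) (n : Int) (f : Nat) (i j k res v : Int)
    (h : j < n) (hv : PySem.List.pyGet? num j = some v) (h1 : v = 1) :
    pyLoopA num n (f+1) i j k res = pyLoopA num n f i (j+1) k res := by
  subst h1
  simp only [pyLoopA]
  rw [if_pos h, hv]
  rfl

lemma pyLoopA_flip (num : List Int) (n : Int) (f : Nat) (i j k res v : Int)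
    (h : j < n) (hv : PySem.List.pyGet? num j = some v) (h1 : v ≠ 1) (h2 : k > 0) :
    pyLoopA num n (f+1) i j k res = pyLoopA num n f i (j+1) (k-1) res := by
  simp only [pyLoopA]
  rw [if_pos h, hv]
  simp [h1, h2]

lemma pyLoopA_move (num : List Int) (n : Int) (f : Nat) (i j k res v : Int)
    (h : j < n) (hv : PySem.List.pyGet? num j = some v) (h1 : v ≠ 1) (h2 : ¬ k > 0) :
    pyLoopA num n (f+1) i j k res
      = pyLoopA num n f (pySkipOnes num j (j - i).toNat i + 1) (j+1) k (max res (j - i)) := by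
  simp only [pyLoopA]
  rw [if_pos h, hv]
  simp [h1, h2]

lemma pvMain (num : List Int) (n k : Int) (hlen : n ≤ (num.length : Int)) (hn : 0 < n) :
    ∀ (f : Nat) (jn : Nat) (k' res : Int), jn ≤ n.toNat → n.toNat - jn ≤ f →
    k' = k - min (((pvZN num n.toNat).countP (fun x => decide (x < jn)) : Int)) ((k.toNat : Int)) →
    res = pvRes num n k.toNat ((pvZN num n.toNat).countP (fun x => decide (x < jn)) - k.toNat) →
    pyLoopA num n f (pvI num n k.toNat ((pvZN num n.toNat).countP (fun x => decide (x < jn)))) (jn : Int) k' res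
      = max (pvRes num n k.toNat ((pvZN num n.toNat).length - k.toNat))
            (n - pvI num n k.toNat ((pvZN num n.toNat).length)) := by
  have hcN : (pvZN num n.toNat).countP (fun x => decide (x < n.toNat)) = (pvZN num n.toNat).length :=
    List.countP_eq_length.mpr (fun x hx => by simpa using ((pvZN_mem num n.toNat x).1 hx).1)
  have hNc : ((n.toNat : Int)) = n := by omega
  intro f
  induction f with
  | zero =>
    intro jn k' res hjn hf hk hres
    have hjN : jn = n.toNat := by omega
    subst hjN
    rw [hcN] at hres ⊢
    subst hres
    simp only [pyLoopA]
    rw [hNc]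
  | succ f ih =>
    intro jn k' res hjn hf hk hres
    by_cases hend : jn = n.toNat
    · subst hend
      rw [hcN] at hres ⊢
      subst hres
      rw [pyLoopA_end num n f _ _ _ _ (by omega), hNc]
    · have hlt : jn < n.toNat := by omega
      have hjlt : (jn : Int) < n := by omega
      have hidx : jn < num.length := by omega
      have hget : PySem.List.pyGet? num (jn : Int) = some (num.getD jn 0) := by
        rw [PySem.List.pyGet?_natCast, List.getElem?_eq_getElem hidx]
        exact congrArg some (List.getD_eq_getElem num 0 hidx).symm
      set t := (pvZN num n.toNat).countP (fun x => decide (x < jn)) with htdef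
      have hstep := pvCount_step (pvZN num n.toNat) (pvZN_nodup num n.toNat) jn
      have hcast : ((jn:Int)) + 1 = (((jn+1 : Nat)) : Int) := by push_cast; ring
      by_cases hv : num.getD jn 0 = 1
      · -- entry is a one: j moves on, window unchanged
        have hmem : jn ∉ pvZN num n.toNat := fun hm => ((pvZN_mem _ _ _).1 hm).2 hv
        have hc1 : (pvZN num n.toNat).countP (fun x => decide (x < jn+1)) = t := by
          rw [hstep, if_neg hmem]
          omega
        rw [pyLoopA_one num n f _ _ k' res _ hjlt hget hv, hcast]
        have hrec := ih (jn+1) k' res (by omega) (by omega)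
          (by rw [hc1]; exact hk) (by rw [hc1]; exact hres)
        rw [hc1] at hrec
        exact hrec
      · -- entry is a zero
        have hmem : jn ∈ pvZN num n.toNat := (pvZN_mem _ _ _).2 ⟨hlt, hv⟩
        have hc1 : (pvZN num n.toNat).countP (fun x => decide (x < jn+1)) = t+1 := by
          rw [hstep, if_pos hmem]
        obtain ⟨htm, htj⟩ := pvCount_getD (pvZN num n.toNat) (pvZN_pairwise _ _) jn hmem
        have hPpw := pvP_pairwise num n (le_of_lt hn)
        have hPlen := pvP_length num n
        have hjP : ((jn : Int)) = (pvP num n).getD (t+1) 0 := by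
          rw [pvP_getD_succ num n t htm, htj]
        by_cases hkpos : k' > 0
        · -- a flip is available
          have htk : t < k.toNat := by rw [hk] at hkpos; omega
          have e1 : t - k.toNat = 0 := by omega
          have e2 : (t+1) - k.toNat = 0 := by omega
          rw [pyLoopA_flip num n f _ _ k' res _ hjlt hget hv hkpos, hcast]
          have hki : k' - 1 = k - min (((t+1 : Nat)) : Int) ((k.toNat : Int)) := by
            rw [hk]; push_cast; omega
          have hresi : res = pvRes num n k.toNat ((t+1) - k.toNat) := by
            rw [hres, e1, e2]
          have hrec := ih (jn+1) (k'-1) res (by omega) (by omega)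
            (by rw [hc1]; exact hki) (by rw [hc1]; exact hresi)
          rw [hc1] at hrec
          have hi : pvI num n k.toNat (t+1) = pvI num n k.toNat t := by
            unfold pvI; rw [e1, e2]
          rw [hi] at hrec
          exact hrec
        · -- no flip left: close the window and advance i past the oldest zero
          have htk : k.toNat ≤ t := by rw [hk] at hkpos; omega
          set s := t - k.toNat with hs
          have hsm : s < (pvZN num n.toNat).length := by omega
          have hib : pvI num n k.toNat t ≤ (pvP num n).getD (s+1) 0 := by
            have h := pvPlusD (pvP num n) hPpw 1 s (by omega)
            unfold pvI
            rw [← hs]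
            push_cast at h
            omega
          have hbj : (pvP num n).getD (s+1) 0 ≤ (jn:Int) := by
            rw [hjP]
            exact pvMono _ hPpw (s+1) (t+1) (by omega) (by omega)
          have hi0 : (0:Int) ≤ pvI num n k.toNat t := by
            have h := pvMono (pvP num n) hPpw 0 s (by omega) (by omega)
            rw [pvP_getD_zero] at h
            unfold pvI
            rw [← hs]
            omega
          have hskip : pySkipOnes num (jn:Int) ((jn:Int) - pvI num n k.toNat t).toNat (pvI num n k.toNat t)
              = (pvP num n).getD (s+1) 0 := by
            apply pvSkip num (jn:Int) _ _ _ hib hbj (by omega) ?_ ?_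
            · intro x hx1 hx2
              have hx0 : 0 ≤ x := by omega
              have hxn : x < n := by omega
              have hxlen : ((x.toNat : Int)) = x := Int.toNat_of_nonneg hx0
              have hxl : x.toNat < num.length := by omega
              rw [← hxlen, PySem.List.pyGet?_natCast, List.getElem?_eq_getElem hxl]
              refine congrArg some ?_
              by_contra hne
              have hxz : x.toNat ∈ pvZN num n.toNat := (pvZN_mem _ _ _).2 ⟨by omega, by
                rw [List.getD_eq_getElem num 0 hxl]; exact hne⟩
              obtain ⟨idx, hidx2, hxeq⟩ := List.getElem_of_mem hxz
              have hPx : (pvP num n).getD (idx+1) 0 = x := by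
                rw [pvP_getD_succ num n idx hidx2, List.getD_eq_getElem _ 0 hidx2, hxeq, hxlen]
              by_cases hcmp : idx + 1 ≤ s
              · have h := pvMono (pvP num n) hPpw (idx+1) s hcmp (by omega)
                rw [hPx] at h
                unfold pvI at hx1
                rw [← hs] at hx1
                omega
              · have h := pvMono (pvP num n) hPpw (s+1) (idx+1) (by omega) (by omega)
                rw [hPx] at h
                omega
            · by_cases hseq : s = t
              · left; rw [hjP, hseq]
              · right
                constructor
                · rw [hjP]
                  have h := pvPlusD (pvP num n) hPpw (t - s) (s+1) (by omega)
                  have harith : s + 1 + (t - s) = t + 1 := by omega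
                  rw [harith] at h
                  have hts : (1:Int) ≤ ((t - s : Nat) : Int) := by
                    have : 1 ≤ t - s := by omega
                    exact_mod_cast this
                  omega
                · have hzx : (pvZN num n.toNat).getD s 0 ∈ pvZN num n.toNat := by
                    rw [List.getD_eq_getElem _ 0 hsm]
                    exact List.getElem_mem _
                  obtain ⟨hzlt, hzv⟩ := (pvZN_mem _ _ _).1 hzx
                  refine ⟨num.getD ((pvZN num n.toNat).getD s 0) 0, ?_, hzv⟩
                  rw [pvP_getD_succ num n s hsm, PySem.List.pyGet?_natCast]
                  have hzl : (pvZN num n.toNat).getD s 0 < num.length := by omega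
                  rw [List.getElem?_eq_getElem hzl]
                  exact congrArg some (List.getD_eq_getElem num 0 hzl).symm
          rw [pyLoopA_move num n f _ _ k' res _ hjlt hget hv hkpos, hskip, hcast]
          have hresmax : max res ((jn:Int) - pvI num n k.toNat t) = pvRes num n k.toNat (s+1) := by
            rw [hres, pvRes_succ]
            congr 1
            rw [hjP]
            unfold pvTerm pvI
            rw [← hs]
            have e : s + k.toNat + 1 = t + 1 := by omega
            rw [e]
            ring
          rw [hresmax]
          have hinew : (pvP num n).getD (s+1) 0 + 1 = pvI num n k.toNat (t+1) := by
            unfold pvI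
            have e : t + 1 - k.toNat = s + 1 := by omega
            rw [e]
          rw [hinew]
          have hki : k' = k - min (((t+1 : Nat)) : Int) ((k.toNat : Int)) := by
            rw [hk]; push_cast; omega
          have hresi : pvRes num n k.toNat (s+1) = pvRes num n k.toNat ((t+1) - k.toNat) := by
            congr 1; omega
          have hrec := ih (jn+1) k' (pvRes num n k.toNat (s+1)) (by omega) (by omega)
            (by rw [hc1]; exact hki) (by rw [hc1]; exact hresi)
          rw [hc1] at hrec
          exact hrec

-- ===== VERDICT (by name: the statement is the Claim_ definition above) =====
theorem maxSolutionNumber_spec : Claim_equal_maxSolutionNumber := by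
  intro n k num _hdom hpre
  unfold Spec_maxSolutionNumber
  unfold Pre_maxSolutionNumber at hpre
  by_cases hn : 0 < n
  · -- main case
    have hnn : (0:Int) ≤ n := le_of_lt hn
    have hN : n.toNat ≤ num.length := by omega
    have hlenpref : (num.take n.toNat).length = n.toNat := by
      rw [List.length_take]; omega
    have hLc : ((num.take n.toNat).length : Int) = n := by rw [hlenpref]; omega
    have hK : (if 0 < k then k else (0:Int)) = (k.toNat : Int) := by split_ifs <;> omega
    set m := (pvZN num n.toNat).length with hm
    -- B's zero-position list is pvZN mapped to Int
    have hzb : (PySem.List.enumerate (num.take n.toNat) 0).filterMap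
          (fun iv => if iv.2 ≠ 1 then some iv.1 else none)
        = (pvZN num n.toNat).map (fun t : Nat => (t : Int)) := by
      rw [pvEnumFilter]
      rw [List.filter_congr (fun t ht => by
        have ht' : t < n.toNat := by
          rw [hlenpref] at ht; exact List.mem_range.1 ht
        rw [pvTakeGetD num n.toNat t ht'])]
      rw [hlenpref]
      apply List.map_congr_left
      intro t _
      simp
    have hB : maxSolutionNumber_alt n k num =
        (if ((m : Int)) ≤ ((k.toNat:Int)) then n
         else (PySem.List.max? (((PySem.List.pyRange 0 ((m:Int) - (k.toNat:Int) + 1) 1)).map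
             (fun g => PySem.List.pyGetD (pvP num n) (g + (k.toNat:Int) + 1) 0
               - PySem.List.pyGetD (pvP num n) g 0 - 1)) (fun x => x)).getD 0) := by
      simp only [maxSolutionNumber_alt, if_pos hn]
      rw [PySem.List.slice_to num hnn]
      simp only [hzb, List.length_map, hLc, hK]
      rfl
    -- A's loop computes the same window maximum (pvMain)
    have hc0 : (pvZN num n.toNat).countP (fun x => decide (x < 0)) = 0 :=
      List.countP_eq_zero.mpr (fun x _ => by simp)
    have hA := pvMain num n k hpre hn n.toNat 0 k 0 (by omega) (by omega)
      (by rw [hc0]; push_cast; omega)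
      (by rw [hc0]; simp [pvRes])
    rw [hc0] at hA
    have hi0 : pvI num n k.toNat 0 = 0 := by
      unfold pvI
      rw [Nat.zero_sub, pvP_getD_zero]
      ring
    rw [hi0] at hA
    simp only [Nat.cast_zero] at hA
    unfold maxSolutionNumber
    rw [hA, hB]
    by_cases hmk : ((m : Int)) ≤ ((k.toNat:Int))
    · rw [if_pos hmk]
      have e : m - k.toNat = 0 := by omega
      unfold pvI
      rw [e, pvP_getD_zero]
      have h0 : pvRes num n k.toNat 0 = 0 := by simp [pvRes]
      rw [h0]
      omega
    · rw [if_neg hmk]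
      have hmk' : k.toNat < m := by omega
      set s := m - k.toNat with hs
      have hb : (((m:Int) - (k.toNat:Int) + 1 - 0).toNat) = s + 1 := by omega
      have hlist : ((PySem.List.pyRange 0 ((m:Int) - (k.toNat:Int) + 1) 1)).map
            (fun g => PySem.List.pyGetD (pvP num n) (g + (k.toNat:Int) + 1) 0
              - PySem.List.pyGetD (pvP num n) g 0 - 1)
          = (List.range (s+1)).map (fun g => pvTerm num n k.toNat g) := by
        rw [PySem.List.pyRange_one, hb, List.map_map]
        apply List.map_congr_left
        intro g _
        simp only [Function.comp]
        have c1 : (0: Int) + (g:Int) + ((k.toNat:Int)) + 1 = (((g + k.toNat + 1 : Nat)) : Int) := by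
          push_cast; ring
        have c2 : (0:Int) + (g:Int) = (((g : Nat)):Int) := by push_cast; ring
        rw [c1, c2, PySem.List.pyGetD_natCast, PySem.List.pyGetD_natCast]
        rfl
      rw [hlist]
      have hpos : ∀ x ∈ (List.range (s+1)).map (fun g => pvTerm num n k.toNat g), 0 ≤ x := by
        intro x hx
        obtain ⟨g, hg, rfl⟩ := List.mem_map.1 hx
        have hg' : g < s+1 := List.mem_range.1 hg
        have h := pvPlusD (pvP num n) (pvP_pairwise num n hnn) (k.toNat+1) g
          (by rw [pvP_length]; omega)
        unfold pvTerm
        have e : g + (k.toNat + 1) = g + k.toNat + 1 := by omega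
        rw [e] at h
        push_cast at h
        omega
      rw [pvMaxFold _ hpos, List.foldl_map]
      have hfold : (List.range (s+1)).foldl (fun a g => max a (pvTerm num n k.toNat g)) 0
          = pvRes num n k.toNat (s+1) := rfl
      rw [hfold, pvRes_succ]
      have hterm : n - pvI num n k.toNat m = pvTerm num n k.toNat s := by
        unfold pvI pvTerm
        rw [← hs]
        have e2 : s + k.toNat + 1 = m + 1 := by omega
        rw [e2, pvP_getD_last]
        ring
      rw [hm.symm, hterm]
  · -- n ≤ 0: both return 0
    have hn0 : n.toNat = 0 := by omega
    have hA0 : maxSolutionNumber n k num = 0 := by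
      unfold maxSolutionNumber
      rw [hn0]
      simp [pyLoopA]
    have hcond : ((0:Int) ≤ if 0 < k then k else 0) := by split_ifs <;> omega
    have hB0 : maxSolutionNumber_alt n k num = 0 := by
      simp [maxSolutionNumber_alt, hn, PySem.List.enumerate_nil, hcond]
    rw [hA0, hB0]
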